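-- pv_equiv track=rewrite | github.com/pypi-data/pypi-mirror-194 | packages/log2frame/log2frame-0.1.19-py3-none-any.whl/log2frame/rft.py | get_col_width
-- ===== SOURCE A (Python) =====
-- def get_col_width(line: str) -> list:
--     if len(line) == 0:
--         return []
--     cols_steps = []
--     for i in range(len(line)):
--         if line[i] != ' ' and i == 0:
--             cols_steps.append(i)
--         elif line[i] != ' ' and i == 1 and line[i - 1] == ' ':
--             cols_steps.append(i)
--         elif line[i] != ' ' and line[i - 2:i] == '  ':
--             cols_steps.append(i)
--     return cols_steps
-- ===== SOURCE B (Python) =====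
-- def get_col_width(line: str) -> list:
--     # One-pass state machine: count the run of spaces seen so far (start at 2,
--     # as if the line were padded with two spaces); a non-space character starts
--     # a column exactly when at least two spaces precede it.
--     cols = []
--     spaces = 2
--     for i, ch in enumerate(line):
--         if ch == ' ':
--             spaces += 1
--         else:
--             if spaces >= 2:
--                 cols.append(i)
--             spaces = 0
--     return cols
-- ===== Notes on version B (the rewrite author's own statement) =====
-- stated objective: simpler
-- what changed: Replaced the indexed loop with three special-cased branches (i==0, i==1, slice comparison line[i-2:i]==' ') by a single uniform state machine that counts the current run of spaces (seeded with 2 as virtual padding), so no indexing or slicing is needed.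
import Mathlib
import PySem

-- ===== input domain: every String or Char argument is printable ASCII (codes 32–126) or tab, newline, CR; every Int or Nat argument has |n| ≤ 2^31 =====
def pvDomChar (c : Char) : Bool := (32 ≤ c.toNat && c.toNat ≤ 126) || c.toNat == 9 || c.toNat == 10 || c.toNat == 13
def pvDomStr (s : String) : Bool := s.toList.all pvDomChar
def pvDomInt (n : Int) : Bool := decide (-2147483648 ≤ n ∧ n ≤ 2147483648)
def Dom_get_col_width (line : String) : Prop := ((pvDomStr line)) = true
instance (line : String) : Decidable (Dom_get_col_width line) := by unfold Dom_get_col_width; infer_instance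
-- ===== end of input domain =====

-- B replaces A's indexed loop with three special-cased branches by a one-pass
-- space-run counter (seeded with 2 as virtual padding); simpler, no indexing/slicing.

-- ===== PORT A =====
def get_col_width (line : String) : List Int :=
  if PySem.Str.len line = 0 then []
  else
    (PySem.List.pyRange 0 (PySem.Str.len line)).foldl
      (fun cols i =>
        if PySem.Str.pyGet? line i ≠ some ' ' ∧ i = 0 then cols ++ [i]
        else if PySem.Str.pyGet? line i ≠ some ' ' ∧ i = 1 ∧ PySem.Str.pyGet? line (i - 1) = some ' ' then cols ++ [i]
        else if PySem.Str.pyGet? line i ≠ some ' ' ∧ PySem.Str.slice line (some (i - 2)) (some i) = "  " then cols ++ [i]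
        else cols) []

-- ===== PORT B =====
def get_col_width_alt (line : String) : List Int :=
  ((PySem.List.enumerate line.toList).foldl
    (fun (st : Int × List Int) p =>
      if p.2 = ' ' then (st.1 + 1, st.2)
      else (0, if 2 ≤ st.1 then st.2 ++ [p.1] else st.2))
    (2, [])).2

-- ===== PRECONDITION & SPEC =====
def Spec_get_col_width (line : String) (out : List Int) : Prop := out = get_col_width_alt line
instance (line : String) (out : List Int) : Decidable (Spec_get_col_width line out) := by unfold Spec_get_col_width; infer_instance

-- ===== CLAIM (what is proved, stated in full; the proofs are below) =====
def Claim_equal_get_col_width : Prop := ∀ (line : String), Dom_get_col_width line → Spec_get_col_width line (get_col_width line)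

-- ===== LEMMAS AND PROOFS =====

/-- The common per-index condition: character k is non-space and is (virtually
padding the line on the left with two spaces) preceded by two spaces. -/
def pvCond (cs : List Char) (k : Nat) : Bool :=
  decide (cs[k]? ≠ some ' ' ∧
    (k = 0 ∨ (k = 1 ∧ cs[0]? = some ' ') ∨
     (2 ≤ k ∧ cs[k-1]? = some ' ' ∧ cs[k-2]? = some ' ')))

/-- A's branch condition as a single boolean predicate. -/
def pvACond (line : String) (i : Int) : Bool :=
  decide ((PySem.Str.pyGet? line i ≠ some ' ' ∧ i = 0) ∨
    (PySem.Str.pyGet? line i ≠ some ' ' ∧ i = 1 ∧ PySem.Str.pyGet? line (i - 1) = some ' ') ∨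
    (PySem.Str.pyGet? line i ≠ some ' ' ∧ PySem.Str.slice line (some (i - 2)) (some i) = "  "))

lemma pvSlice0 (cs : List Char) : PySem.List.slice cs (some (-2)) (some 0) = [] := by
  simp [PySem.List.slice, PySem.List.clampIdx]

lemma pvSlice1 (cs : List Char) (h : 2 ≤ cs.length) :
    PySem.List.slice cs (some (-1)) (some 1) = [] := by
  have hne : cs ≠ [] := by rintro rfl; simp at h
  simp [PySem.List.slice, PySem.List.clampIdx, hne]
  omega

lemma pvSlice2 (cs : List Char) (k : Nat) (h2 : 2 ≤ k) (hk : k < cs.length) :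
    PySem.List.slice cs (some ((k : Int) - 2)) (some (k : Int)) =
      [cs[k-2]'(by omega), cs[k-1]'(by omega)] := by
  have e1 : ((k:Int) - 2).toNat = k - 2 := by omega
  simp [PySem.List.slice, PySem.List.clampIdx, e1, Nat.min_eq_left (le_of_lt hk),
    Nat.min_eq_left (show k - 2 ≤ cs.length by omega), show ¬ (k ≤ 1) by omega,
    show ¬ ((k:Int) < 0) by omega]
  rw [show k - (k-2) = 2 from by omega]
  rw [List.drop_eq_getElem_cons (by omega), List.drop_eq_getElem_cons (by omega)]
  simp only [show k - 2 + 1 = k - 1 from by omega, List.take_succ_cons, List.take_zero]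


lemma pvCond_agree (line : String) (k : Nat) (hk : k < line.toList.length) :
    pvACond line (k : Int) = pvCond line.toList k := by
  have hsl : ∀ a b, PySem.Str.slice line a b = "  " ↔
      PySem.List.slice line.toList a b = [' ', ' '] := by
    intro a b
    rw [String.ext_iff, PySem.Str.toList_slice]
    simp [PySem.Chars.slice_eq_listSlice]
  have h0 := PySem.List.pyGet?_natCast line.toList 0
  have h1 := PySem.List.pyGet?_natCast line.toList 1
  simp only [pvACond, pvCond]
  rw [decide_eq_decide]
  match k with
  | 0 =>
    rw [hsl]
    simp only [Nat.cast_zero] at h0 ⊢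
    simp [pvSlice0, h0]
  | 1 =>
    rw [hsl]
    simp only [Nat.cast_one, Nat.cast_zero] at h0 h1 ⊢
    simp [pvSlice1 line.toList (by omega), h0, h1]
  | (k+2) =>
    rw [hsl, pvSlice2 line.toList (k+2) (by omega) hk]
    have ha := PySem.List.pyGet?_natCast line.toList (k+2)
    have hb := PySem.List.pyGet?_natCast line.toList (k+1)
    push_cast at ha hb ⊢
    have e1 : ((k:Int) + 2) - 1 = (k:Int) + 1 := by ring
    simp [e1, ha, hb, List.getElem?_eq_getElem (show k < line.toList.length by omega),
      List.getElem?_eq_getElem (show k+1 < line.toList.length by omega), List.getElem?_eq_getElem hk,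
      show ((k:Int)+2) ≠ 0 by omega, show ((k:Int)+2) ≠ 1 by omega]
    tauto

set_option maxHeartbeats 1000000 in
lemma pvA_eq_filter (line : String) :
    get_col_width line =
      (((List.range line.toList.length).filter (pvCond line.toList)).map (fun k => (k : Int))) := by
  unfold get_col_width
  by_cases h0 : line.toList.length = 0
  · simp [PySem.Str.len_eq, h0]
  · rw [if_neg (by rw [PySem.Str.len_eq]; exact_mod_cast h0)]
    have hbody : (fun (cols : List Int) (i : Int) =>
        if PySem.Str.pyGet? line i ≠ some ' ' ∧ i = 0 then cols ++ [i]
        else if PySem.Str.pyGet? line i ≠ some ' ' ∧ i = 1 ∧ PySem.Str.pyGet? line (i - 1) = some ' ' then cols ++ [i]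
        else if PySem.Str.pyGet? line i ≠ some ' ' ∧ PySem.Str.slice line (some (i - 2)) (some i) = "  " then cols ++ [i]
        else cols)
        = fun cols i => if pvACond line i = true then cols ++ [(fun (j : Int) => j) i] else cols := by
      funext cols i
      simp only [pvACond, decide_eq_true_eq]
      split_ifs with a b c d <;> first | rfl | tauto
    rw [hbody, PySem.List.foldl_append_if (pvACond line) (fun (j : Int) => j)]
    rw [PySem.Str.len_eq, PySem.List.pyRange_zero_natCast, List.filter_map]
    simp only [List.nil_append]
    rw [List.filter_congr (p := pvACond line ∘ fun (k : Nat) => (k:Int)) (q := pvCond line.toList)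
      (fun k hk => pvCond_agree line k (List.mem_range.mp hk))]
    simp [Function.comp_def]
    exact List.map_eq_flatMap

lemma pvB_go (full : List Char) (cs : List Char) :
    ∀ (off : Nat) (s : Int) (acc : List Int),
    full.drop off = cs → 0 ≤ s →
    ((1 ≤ s) ↔ (off = 0 ∨ full[off-1]? = some ' ')) →
    ((2 ≤ s) ↔ ((off = 0 ∨ full[off-1]? = some ' ') ∧ (off ≤ 1 ∨ full[off-2]? = some ' '))) →
    ((PySem.List.enumerate cs (off : Int)).foldl
      (fun (st : Int × List Int) p =>
        if p.2 = ' ' then (st.1 + 1, st.2)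
        else (0, if 2 ≤ st.1 then st.2 ++ [p.1] else st.2)) (s, acc)).2
      = acc ++ ((List.range' off cs.length).filter (pvCond full)).map (fun k => (k : Int)) := by
  induction cs with
  | nil => intro off s acc hdrop hs h1 h2; simp [PySem.List.enumerate]
  | cons c cs ih =>
    intro off s acc hdrop hs h1 h2
    have hoff : off < full.length := by
      have := congrArg List.length hdrop
      simp [List.length_drop] at this; omega
    have hget : full[off]? = some c := by
      have h0 : (full.drop off)[0]? = some c := by rw [hdrop]; rfl
      rw [List.getElem?_drop] at h0; simpa using h0
    have hdrop' : full.drop (off+1) = cs := by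
      have h3 : full.drop (off+1) = (full.drop off).drop 1 := by
        rw [List.drop_drop]
      rw [h3, hdrop, List.drop_one]; rfl
    have henum : PySem.List.enumerate (c :: cs) (off : Int)
        = ((off : Int), c) :: PySem.List.enumerate cs ((off+1 : Nat) : Int) := by
      simp [PySem.List.enumerate]
    rw [henum, List.foldl_cons]
    by_cases hc : c = ' '
    · have hpc : pvCond full off = false := by simp [pvCond, hget, hc]
      have step : (if (((off : Int), c)).2 = ' ' then ((s, acc).1 + 1, (s, acc).2)
          else (0, if 2 ≤ (s, acc).1 then (s, acc).2 ++ [(((off : Int), c)).1] else (s, acc).2))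
          = (s + 1, acc) := by simp [hc]
      rw [step, ih (off+1) (s+1) acc hdrop' (by omega)
        (by simp [hget, hc]; omega)
        (by rw [show (2 ≤ s + 1) ↔ (1 ≤ s) from by omega, h1]
            simp [hget, hc, show off + 1 - 2 = off - 1 from by omega,
              show off + 1 ≤ 1 ↔ off = 0 from by omega])]
      simp [List.range'_succ, hpc]
    · have hcond : (pvCond full off = true) ↔ (2 ≤ s) := by
        simp only [pvCond, hget, decide_eq_true_eq]
        rw [h2]
        rcases off with _ | _ | off <;>
          simp [hc, show ∀ m:Nat, m+2-1 = m+1 from fun m => rfl]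
      by_cases hs2 : 2 ≤ s
      · have step : (if (((off : Int), c)).2 = ' ' then ((s, acc).1 + 1, (s, acc).2)
            else (0, if 2 ≤ (s, acc).1 then (s, acc).2 ++ [(((off : Int), c)).1] else (s, acc).2))
            = (0, acc ++ [(off : Int)]) := by simp [hc, hs2]
        rw [step, ih (off+1) 0 (acc ++ [(off : Int)]) hdrop' le_rfl
          (by simp [hget, hc])
          (by simp [hget, hc])]
        simp [List.range'_succ, hcond.mpr hs2]
      · have step : (if (((off : Int), c)).2 = ' ' then ((s, acc).1 + 1, (s, acc).2)
            else (0, if 2 ≤ (s, acc).1 then (s, acc).2 ++ [(((off : Int), c)).1] else (s, acc).2))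
            = (0, acc) := by simp [hc, hs2]
        rw [step, ih (off+1) 0 acc hdrop' le_rfl
          (by simp [hget, hc])
          (by simp [hget, hc])]
        have hpc : pvCond full off = false := by
          rw [Bool.eq_false_iff]; intro h; exact hs2 (hcond.mp h)
        simp [List.range'_succ, hpc]

/-- B's result is the same filter. -/
lemma pvB_eq_filter (line : String) :
    get_col_width_alt line =
      (((List.range line.toList.length).filter (pvCond line.toList)).map (fun k => (k : Int))) := by
  unfold get_col_width_alt
  rw [List.range_eq_range']
  exact pvB_go line.toList line.toList 0 2 [] (by simp) (by norm_num) (by simp) (by simp)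

-- ===== VERDICT (by name: the statement is the Claim_ definition above) =====
theorem get_col_width_spec : Claim_equal_get_col_width := by
  intro line _
  unfold Spec_get_col_width
  rw [pvA_eq_filter, pvB_eq_filter]
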